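-- pv_equiv track=rewrite | github.com/TalantDeveloper/set_algorithm | 17_question.py | innterval
-- ===== SOURCE A (Python) =====
-- def innterval(nums: list) -> list:
--     arrays = []
--     for num in nums:
--         if -5 <= num <= 6:
--             arrays.append(num)
--     for i in range(1, len(arrays)):
--         for j in range(len(arrays) - 1):
--             if arrays[i] <= arrays[j]:
--                 num = arrays[j]
--                 arrays[j] = arrays[i]
--                 arrays[i] = num
--     k = 0
--     for i in range(len(nums)):
--         if nums[i] in arrays:
--             nums[i] = arrays[k]
--             k +=1
--     return nums
-- ===== SOURCE B (Python) =====
-- def innterval(nums: list) -> list: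
--     vals = iter(sorted(v for v in nums if -5 <= v <= 6))
--     for i, v in enumerate(nums):
--         if -5 <= v <= 6:
--             nums[i] = next(vals)
--     return nums
-- ===== Notes on version B (the rewrite author's own statement) =====
-- stated objective: simpler
-- what changed: replaces A's quadratic exchange-swap sort and per-element list-membership scan by a single filtered pass, one sorted() call, and an iterator-driven write-back over the in-range positions
import Mathlib
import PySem

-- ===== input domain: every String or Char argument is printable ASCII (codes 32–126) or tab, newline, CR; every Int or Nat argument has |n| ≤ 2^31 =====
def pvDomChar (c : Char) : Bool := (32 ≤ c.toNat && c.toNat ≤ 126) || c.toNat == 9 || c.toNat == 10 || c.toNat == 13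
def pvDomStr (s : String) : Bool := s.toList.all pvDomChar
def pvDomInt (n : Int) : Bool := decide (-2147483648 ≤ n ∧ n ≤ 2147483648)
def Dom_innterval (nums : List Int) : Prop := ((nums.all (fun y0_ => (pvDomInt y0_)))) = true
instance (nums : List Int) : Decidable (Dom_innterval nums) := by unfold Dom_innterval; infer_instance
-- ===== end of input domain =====

-- B replaces A's exchange-swap sort and per-element membership scan by filter + sorted() +
-- an iterator write-back (simpler). In Python both A and B mutate the argument list `nums`
-- in place and return it; the equivalence proved here is about the returned value.

-- ===== PORT A =====
def innterval (nums : List Int) : List Int :=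
  -- arrays = []; for num in nums: if -5 <= num <= 6: arrays.append(num)
  let arrays0 : List Int :=
    nums.foldl (fun acc num => if -5 ≤ num ∧ num ≤ 6 then acc ++ [num] else acc) []
  -- for i in range(1, len(arrays)): for j in range(len(arrays) - 1): swap if arrays[i] <= arrays[j]
  let arrays : List Int :=
    (PySem.List.pyRange 1 (PySem.List.len arrays0) 1).foldl (fun a i =>
      (PySem.List.pyRange 0 (PySem.List.len a - 1) 1).foldl (fun a j =>
        if PySem.List.pyGetD a i 0 ≤ PySem.List.pyGetD a j 0 then
          let num := PySem.List.pyGetD a j 0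
          let a' := PySem.List.pySetD a j (PySem.List.pyGetD a i 0)
          PySem.List.pySetD a' i num
        else a) a) arrays0
  -- k = 0; for i in range(len(nums)): if nums[i] in arrays: nums[i] = arrays[k]; k += 1
  let res : List Int × Int :=
    (PySem.List.pyRange 0 (PySem.List.len nums) 1).foldl (fun st i =>
      if PySem.List.pyGetD st.1 i 0 ∈ arrays then
        (PySem.List.pySetD st.1 i (PySem.List.pyGetD arrays st.2 0), st.2 + 1)
      else st) (nums, 0)
  res.1

-- ===== PORT B =====
-- for i, v in enumerate(nums): if -5 <= v <= 6: nums[i] = next(vals)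
def pvRefill : List Int → List Int → List Int
  | [], _ => []
  | v :: rest, vs =>
    if -5 ≤ v ∧ v ≤ 6 then vs.headD 0 :: pvRefill rest vs.tail
    else v :: pvRefill rest vs

def innterval_alt (nums : List Int) : List Int :=
  -- vals = iter(sorted(v for v in nums if -5 <= v <= 6))
  let vals := PySem.List.sorted (nums.filter (fun v => decide (-5 ≤ v ∧ v ≤ 6))) (fun x => x) false
  pvRefill nums vals

-- ===== PRECONDITION & SPEC =====
def Spec_innterval (nums : List Int) (out : List Int) : Prop := out = innterval_alt nums
instance (nums : List Int) (out : List Int) : Decidable (Spec_innterval nums out) := by unfold Spec_innterval; infer_instance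

-- ===== CLAIM (what is proved, stated in full; the proofs are below) =====
def Claim_equal_innterval : Prop := ∀ (nums : List Int), Dom_innterval nums → Spec_innterval nums (innterval nums)

-- ===== LEMMAS AND PROOFS =====

def pvPassL : Int → List Int → List Int
  | _, [] => []
  | c, y :: ys => if c ≤ y then c :: pvPassL y ys else y :: pvPassL c ys
def pvPassC (c : Int) (l : List Int) : Int := l.foldl max c

theorem pvPassL_perm (c : Int) (l : List Int) :
    (c :: l).Perm (pvPassL c l ++ [pvPassC c l]) := by
  induction l generalizing c with
  | nil => simp [pvPassL, pvPassC]
  | cons y ys ih =>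
    simp only [pvPassL, pvPassC, List.foldl_cons]
    by_cases h : c ≤ y
    · rw [if_pos h, max_eq_right h]
      exact ((ih y).cons c)
    · rw [if_neg h, max_eq_left (le_of_not_ge h)]
      exact (List.Perm.swap y c ys).trans ((ih c).cons y)

theorem pvPassC_le (c : Int) (l : List Int) : c ≤ pvPassC c l :=
  (PySem.List.le_foldl_max l c).1

theorem pvPassL_mem (c : Int) (l : List Int) {z : Int} (hz : z ∈ pvPassL c l) :
    z = c ∨ z ∈ l := by
  have : z ∈ pvPassL c l ++ [pvPassC c l] := List.mem_append_left _ hz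
  have := (pvPassL_perm c l).symm.subset this
  simpa using this

theorem pvPassL_le (c : Int) (l : List Int) :
    ∀ z ∈ pvPassL c l, z ≤ pvPassC c l := by
  intro z hz
  rcases pvPassL_mem c l hz with h | h
  · exact h ▸ pvPassC_le c l
  · exact (PySem.List.le_foldl_max l c).2 z h

theorem pvPassL_sorted (c : Int) (l : List Int) (h : l.Pairwise (· ≤ ·)) :
    (pvPassL c l).Pairwise (· ≤ ·) := by
  induction l generalizing c with
  | nil => simp [pvPassL]
  | cons y ys ih =>
    rw [List.pairwise_cons] at h
    simp only [pvPassL]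
    by_cases hcy : c ≤ y
    · rw [if_pos hcy]
      refine List.pairwise_cons.2 ⟨?_, ih y h.2⟩
      intro z hz
      rcases pvPassL_mem y ys hz with rfl | hmem
      · exact hcy
      · exact hcy.trans (h.1 z hmem)
    · rw [if_neg hcy]
      refine List.pairwise_cons.2 ⟨?_, ih c h.2⟩
      intro z hz
      rcases pvPassL_mem c ys hz with rfl | hmem
      · exact le_of_not_ge hcy
      · exact h.1 z hmem

theorem pvGetD_append_cons (l t : List Int) (c d : Int) :
    (l ++ c :: t).getD l.length d = c := by
  simp [List.getD_eq_getElem?_getD]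

theorem pvSet_append_cons (l t : List Int) (c v : Int) :
    (l ++ c :: t).set l.length v = l ++ v :: t := by
  induction l with
  | nil => simp
  | cons x xs ih => simp [ih]

theorem pvGetD_drop (k : Nat) (S : List Int) : S.getD k 0 = (S.drop k).headD 0 := by
  induction k generalizing S with
  | zero => cases S <;> simp
  | succ n ih => cases S with
    | nil => simp
    | cons s ss => simp only [List.getD_cons_succ, List.drop_succ_cons]; exact ih ss
def pvStep (i : Nat) (a : List Int) (j : Nat) : List Int :=
  if a.getD i 0 ≤ a.getD j 0 then (a.set j (a.getD i 0)).set i (a.getD j 0) else a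

theorem pvStep_self (i : Nat) (a : List Int) (h : i < a.length) : pvStep i a i = a := by
  simp only [pvStep, le_refl, if_pos, List.set_set]
  rw [List.getD_eq_getElem?_getD, List.getElem?_eq_getElem h]
  exact List.set_getElem_self h

theorem pvL1 (i : Nat) : ∀ (p d t : List Int) (c : Int), i = d.length + p.length →
    List.foldl (pvStep i) (d ++ p ++ c :: t) (List.range' d.length p.length)
      = d ++ pvPassL c p ++ pvPassC c p :: t := by
  intro p
  induction p with
  | nil => intro d t c _; simp [pvPassL, pvPassC]
  | cons y ys ih =>
    intro d t c hi
    rw [List.length_cons, List.range'_succ, List.foldl_cons]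
    have hgi : (d ++ (y :: ys) ++ c :: t).getD i 0 = c := by
      have := pvGetD_append_cons (d ++ y :: ys) t c 0
      simp only [List.length_append, List.length_cons] at this
      rw [List.append_assoc] at this
      simp only [List.cons_append] at this ⊢
      rw [hi]; simpa [Nat.add_comm, Nat.add_assoc, Nat.add_left_comm] using this
    have hgj : (d ++ (y :: ys) ++ c :: t).getD d.length 0 = y := by
      have := pvGetD_append_cons d (ys ++ c :: t) y 0
      simpa [List.append_assoc] using this
    by_cases h : c ≤ y
    · have hstep : pvStep i (d ++ (y :: ys) ++ c :: t) d.length = (d ++ [c]) ++ ys ++ y :: t := by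
        simp only [pvStep, hgi, hgj, if_pos h]
        have hset1 : (d ++ (y :: ys) ++ c :: t).set d.length c
            = (d ++ c :: ys) ++ c :: t := by
          have := pvSet_append_cons d (ys ++ c :: t) y c
          simp only [List.append_assoc, List.cons_append] at this ⊢
          exact this
        rw [hset1]
        have hset2 : ((d ++ c :: ys) ++ c :: t).set i y = (d ++ c :: ys) ++ y :: t := by
          have := pvSet_append_cons (d ++ c :: ys) t c y
          simp only [List.length_append, List.length_cons] at this
          rw [hi]
          simpa [Nat.add_comm, Nat.add_assoc, Nat.add_left_comm] using this
        rw [hset2]; simp [List.append_assoc]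
      rw [hstep]
      have hrec := ih (d ++ [c]) t y (by simp at hi ⊢; omega)
      simp only [pvPassL, pvPassC, if_pos h, List.foldl_cons]
      have hmax : max c y = y := max_eq_right h
      rw [hmax]
      calc List.foldl (pvStep i) ((d ++ [c]) ++ ys ++ y :: t) (List.range' (d.length + 1) ys.length)
          = (d ++ [c]) ++ pvPassL y ys ++ pvPassC y ys :: t := by
            simpa using hrec
        _ = d ++ (c :: pvPassL y ys) ++ pvPassC y ys :: t := by
            simp [List.append_assoc]
    · have hstep : pvStep i (d ++ (y :: ys) ++ c :: t) d.length = (d ++ [y]) ++ ys ++ c :: t := by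
        simp only [pvStep, hgi, hgj, if_neg h]
        simp [List.append_assoc]
      rw [hstep]
      have hrec := ih (d ++ [y]) t c (by simp at hi ⊢; omega)
      simp only [pvPassL, pvPassC, if_neg h, List.foldl_cons]
      have hmax : max c y = c := max_eq_left (le_of_not_ge h)
      rw [hmax]
      calc List.foldl (pvStep i) ((d ++ [y]) ++ ys ++ c :: t) (List.range' (d.length + 1) ys.length)
          = (d ++ [y]) ++ pvPassL c ys ++ pvPassC c ys :: t := by
            simpa using hrec
        _ = d ++ (y :: pvPassL c ys) ++ pvPassC c ys :: t := by
            simp [List.append_assoc]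

theorem pvL2 : ∀ (p : List Int) (pr mid t : List Int) (c : Int),
    List.foldl (pvStep pr.length) (pr ++ c :: mid ++ p ++ t)
        (List.range' (pr.length + 1 + mid.length) p.length)
      = pr ++ pvPassC c p :: mid ++ pvPassL c p ++ t := by
  intro p
  induction p with
  | nil => intro pr mid t c; simp [pvPassL, pvPassC]
  | cons y ys ih =>
    intro pr mid t c
    rw [List.length_cons, List.range'_succ, List.foldl_cons]
    have hgi : (pr ++ c :: mid ++ (y :: ys) ++ t).getD pr.length 0 = c := by
      have := pvGetD_append_cons pr (mid ++ (y :: ys) ++ t) c 0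
      simpa [List.append_assoc] using this
    have hgj : (pr ++ c :: mid ++ (y :: ys) ++ t).getD (pr.length + 1 + mid.length) 0 = y := by
      have := pvGetD_append_cons (pr ++ c :: mid) (ys ++ t) y 0
      simp only [List.length_append, List.length_cons] at this
      simpa [List.append_assoc, Nat.add_comm, Nat.add_assoc, Nat.add_left_comm] using this
    by_cases h : c ≤ y
    · have hstep : pvStep pr.length (pr ++ c :: mid ++ (y :: ys) ++ t) (pr.length + 1 + mid.length)
          = pr ++ y :: (mid ++ [c]) ++ ys ++ t := by
        simp only [pvStep, hgi, hgj, if_pos h]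
        have hset1 : (pr ++ c :: mid ++ (y :: ys) ++ t).set (pr.length + 1 + mid.length) c
            = (pr ++ c :: mid) ++ c :: ys ++ t := by
          have := pvSet_append_cons (pr ++ c :: mid) (ys ++ t) y c
          simp only [List.length_append, List.length_cons] at this
          simpa [List.append_assoc, Nat.add_comm, Nat.add_assoc, Nat.add_left_comm] using this
        rw [hset1]
        have hset2 : ((pr ++ c :: mid) ++ c :: ys ++ t).set pr.length y
            = pr ++ y :: (mid ++ [c]) ++ ys ++ t := by
          have := pvSet_append_cons pr (mid ++ c :: ys ++ t) c y
          simpa [List.append_assoc] using this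
        exact hset2
      rw [hstep]
      have hrec := ih pr (mid ++ [c]) t y
      simp only [pvPassL, pvPassC, if_pos h, List.foldl_cons]
      rw [max_eq_right h]
      calc List.foldl (pvStep pr.length) (pr ++ y :: (mid ++ [c]) ++ ys ++ t)
              (List.range' (pr.length + 1 + mid.length + 1) ys.length)
          = pr ++ pvPassC y ys :: (mid ++ [c]) ++ pvPassL y ys ++ t := by
            have hlen : pr.length + 1 + (mid ++ [c]).length = pr.length + 1 + mid.length + 1 := by
              simp; omega
            rw [← hlen]; exact hrec
        _ = pr ++ pvPassC y ys :: mid ++ (c :: pvPassL y ys) ++ t := by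
            simp [List.append_assoc]
    · have hstep : pvStep pr.length (pr ++ c :: mid ++ (y :: ys) ++ t) (pr.length + 1 + mid.length)
          = pr ++ c :: (mid ++ [y]) ++ ys ++ t := by
        simp only [pvStep, hgi, hgj, if_neg h]
        simp [List.append_assoc]
      rw [hstep]
      have hrec := ih pr (mid ++ [y]) t c
      simp only [pvPassL, pvPassC, if_neg h, List.foldl_cons]
      rw [max_eq_left (le_of_not_ge h)]
      calc List.foldl (pvStep pr.length) (pr ++ c :: (mid ++ [y]) ++ ys ++ t)
              (List.range' (pr.length + 1 + mid.length + 1) ys.length)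
          = pr ++ pvPassC c ys :: (mid ++ [y]) ++ pvPassL c ys ++ t := by
            have hlen : pr.length + 1 + (mid ++ [y]).length = pr.length + 1 + mid.length + 1 := by
              simp; omega
            rw [← hlen]; exact hrec
        _ = pr ++ pvPassC c ys :: mid ++ (y :: pvPassL c ys) ++ t := by
            simp [List.append_assoc]

theorem pvPassL_length (c : Int) (l : List Int) : (pvPassL c l).length = l.length := by
  induction l generalizing c with
  | nil => rfl
  | cons y ys ih => simp only [pvPassL]; split <;> simp [ih]

theorem pvInner_nil (pre : List Int) (x : Int) :
    List.foldl (pvStep pre.length) (pre ++ [x]) (List.range pre.length)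
      = pvPassL x pre ++ [pvPassC x pre] := by
  have := pvL1 pre.length pre [] [] x (by simp)
  simpa [List.range_eq_range'] using this

theorem pvInner_cons (pre mid : List Int) (x lst : Int) :
    List.foldl (pvStep pre.length) (pre ++ x :: mid ++ [lst])
        (List.range (pre.length + 1 + mid.length))
      = pvPassL x pre ++ pvPassC (pvPassC x pre) mid ::
          pvPassL (pvPassC x pre) mid ++ [lst] := by
  have hsplit : List.range (pre.length + 1 + mid.length)
      = (List.range' 0 pre.length ++ List.range' pre.length 1)
          ++ List.range' (pre.length + 1) mid.length := by
    rw [List.range_eq_range']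
    have h1 : List.range' 0 pre.length 1 ++ List.range' (0 + 1 * pre.length) 1 1
        = List.range' 0 (pre.length + 1) 1 := List.range'_append
    have h2 : List.range' 0 (pre.length + 1) 1 ++ List.range' (0 + 1 * (pre.length + 1)) mid.length 1
        = List.range' 0 (pre.length + 1 + mid.length) 1 := List.range'_append
    simp only [Nat.zero_add, Nat.one_mul] at h1 h2
    rw [← h2, ← h1]
  rw [hsplit, List.foldl_append, List.foldl_append]
  -- phase 1
  have hp1 : List.foldl (pvStep pre.length) (pre ++ x :: mid ++ [lst]) (List.range' 0 pre.length)
      = pvPassL x pre ++ pvPassC x pre :: (mid ++ [lst]) := by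
    have := pvL1 pre.length pre [] (mid ++ [lst]) x (by simp)
    simpa [List.append_assoc] using this
  rw [hp1]
  -- phase 2: scanning the pivot itself is a no-op
  have hlenpr : (pvPassL x pre).length = pre.length := pvPassL_length x pre
  have hp2 : List.foldl (pvStep pre.length)
      (pvPassL x pre ++ pvPassC x pre :: (mid ++ [lst])) (List.range' pre.length 1)
      = pvPassL x pre ++ pvPassC x pre :: (mid ++ [lst]) := by
    rw [List.range'_one, List.foldl_cons, List.foldl_nil]
    exact pvStep_self _ _ (by simp [hlenpr])
  rw [hp2]
  -- phase 3
  have hp3 := pvL2 mid (pvPassL x pre) [] [lst] (pvPassC x pre)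
  rw [hlenpr] at hp3
  simpa using hp3

theorem pvPyRange_cast (s len : Nat) :
    PySem.List.pyRange (s : Int) ((s : Int) + (len : Int)) 1
      = List.map (fun k : Nat => (k : Int)) (List.range' s len) := by
  induction len generalizing s with
  | zero => simp
  | succ n ih =>
    have hlt : (s : Int) < (s : Int) + ((n : Int) + 1) := by omega
    rw [show ((n + 1 : Nat) : Int) = (n : Int) + 1 by push_cast; ring]
    rw [PySem.List.pyRange_one_cons hlt]
    rw [List.range'_succ, List.map_cons]
    congr 1
    have := ih (s + 1)
    rw [show ((s + 1 : Nat) : Int) = (s : Int) + 1 by push_cast; ring] at this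
    rw [← this]
    congr 1
    omega

-- A's inner fold in PySem form equals the Nat-form fold with pvStep.
theorem pvInnerFold_eq (a : List Int) (i : Nat) (h : 1 ≤ a.length) :
    (PySem.List.pyRange 0 (PySem.List.len a - 1) 1).foldl (fun b j =>
        if PySem.List.pyGetD b (i : Int) 0 ≤ PySem.List.pyGetD b j 0 then
          let num := PySem.List.pyGetD b j 0
          let b' := PySem.List.pySetD b j (PySem.List.pyGetD b (i : Int) 0)
          PySem.List.pySetD b' i num
        else b) a
      = List.foldl (pvStep i) a (List.range (a.length - 1)) := by
  have hlen : PySem.List.len a - 1 = ((a.length - 1 : Nat) : Int) := by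
    rw [PySem.List.len_eq]; omega
  rw [hlen]
  have hr := pvPyRange_cast 0 (a.length - 1)
  simp only [Nat.cast_zero, zero_add] at hr
  rw [hr, ← List.range_eq_range', List.foldl_map]
  apply PySem.List.foldl_congr_mem
  intro acc x _
  simp only [PySem.List.pyGetD_natCast, PySem.List.pySetD_natCast]
  rfl

theorem pvTake_append_cons (l t : List Int) (c : Int) :
    (l ++ c :: t).take (l.length + 1) = l ++ [c] := by
  rw [List.take_append]
  simp

-- One outer iteration keeps length and multiset, and extends the sorted prefix.
theorem pvOuter_step (a : List Int) (i : Nat) (h2 : i < a.length)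
    (hs : (a.take i).Pairwise (· ≤ ·)) :
    (List.foldl (pvStep i) a (List.range (a.length - 1))).Perm a ∧
    (List.foldl (pvStep i) a (List.range (a.length - 1))).length = a.length ∧
    ((List.foldl (pvStep i) a (List.range (a.length - 1))).take (i + 1)).Pairwise (· ≤ ·) := by
  have hpre : (a.take i).length = i := by
    rw [List.length_take]; omega
  have ha : a = a.take i ++ a[i] :: a.drop (i + 1) := by
    conv_lhs => rw [← List.take_append_drop i a]
    rw [List.drop_eq_getElem_cons h2]
  set pre := a.take i with hpredef
  set x := a[i] with hxdef
  set suf := a.drop (i + 1) with hsufdef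
  rcases List.eq_nil_or_concat suf with hnil | ⟨mid, lst, hconcat⟩
  · -- pivot is the last element
    have ha' : a = pre ++ [x] := by rw [ha, hnil]
    have hlen : a.length = i + 1 := by rw [ha']; simp [hpre]
    have hfold : List.foldl (pvStep i) a (List.range (a.length - 1))
        = pvPassL x pre ++ [pvPassC x pre] := by
      rw [hlen]
      simp only [Nat.add_sub_cancel]
      conv_lhs => rw [ha']
      rw [show List.range i = List.range pre.length by rw [hpre]]
      rw [show pvStep i = pvStep pre.length by rw [hpre]]
      exact pvInner_nil pre x
    rw [hfold]
    refine ⟨?_, ?_, ?_⟩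
    · refine ((pvPassL_perm x pre).symm.trans ?_)
      rw [ha']
      exact (List.perm_append_singleton x pre).symm
    · simp [pvPassL_length, hlen, hpre]
    · have htk : (pvPassL x pre ++ [pvPassC x pre]).take (i + 1)
          = pvPassL x pre ++ [pvPassC x pre] := by
        apply List.take_of_length_le
        simp [pvPassL_length, hpre]
      rw [htk, List.pairwise_append]
      exact ⟨pvPassL_sorted x pre hs, List.pairwise_singleton _ _,
        fun z hz b hb => by simp at hb; subst hb; exact pvPassL_le x pre z hz⟩
  · -- pivot is strictly inside
    have ha' : a = pre ++ x :: mid ++ [lst] := by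
      rw [ha, hconcat]; simp [List.append_assoc]
    have hlen : a.length = i + 1 + mid.length + 1 := by
      rw [ha']; simp [hpre]; omega
    set c1 := pvPassC x pre with hc1
    set c2 := pvPassC c1 mid with hc2
    have hfold : List.foldl (pvStep i) a (List.range (a.length - 1))
        = pvPassL x pre ++ c2 :: pvPassL c1 mid ++ [lst] := by
      rw [hlen]
      simp only [Nat.add_sub_cancel]
      conv_lhs => rw [ha']
      rw [show i + 1 + mid.length = pre.length + 1 + mid.length by rw [hpre]]
      rw [show pvStep i = pvStep pre.length by rw [hpre]]
      exact pvInner_cons pre mid x lst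
    rw [hfold]
    have hperm : (pvPassL x pre ++ c2 :: pvPassL c1 mid ++ [lst]).Perm a := by
      have p1 : (c2 :: pvPassL c1 mid).Perm (c1 :: mid) :=
        (List.perm_append_singleton c2 (pvPassL c1 mid)).symm.trans (pvPassL_perm c1 mid).symm
      have q1 : (pvPassL x pre ++ c2 :: pvPassL c1 mid ++ [lst]).Perm
          (pvPassL x pre ++ (c1 :: mid) ++ [lst]) := by
        simp only [List.append_assoc]
        exact List.Perm.append_left _ (List.Perm.append_right _ p1)
      have heq : pvPassL x pre ++ (c1 :: mid) = (pvPassL x pre ++ [c1]) ++ mid := by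
        simp
      have q2 : ((pvPassL x pre ++ [c1]) ++ mid).Perm ((x :: pre) ++ mid) :=
        List.Perm.append_right mid (pvPassL_perm x pre).symm
      have q3 : ((x :: (pre ++ mid)) ++ [lst]).Perm a := by
        rw [ha']
        refine List.Perm.append_right _ ?_
        exact (List.perm_middle (a := x) (l₁ := pre) (l₂ := mid)).symm
      refine q1.trans ?_
      rw [heq]
      refine (List.Perm.append_right [lst] q2).trans ?_
      exact q3
    refine ⟨hperm, by simpa [hlen] using hperm.length_eq, ?_⟩
    have htk : (pvPassL x pre ++ c2 :: pvPassL c1 mid ++ [lst]).take (i + 1)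
        = pvPassL x pre ++ [c2] := by
      have hl : (pvPassL x pre).length = i := by rw [pvPassL_length, hpre]
      have := pvTake_append_cons (pvPassL x pre) (pvPassL c1 mid ++ [lst]) c2
      rw [hl] at this
      simpa [List.append_assoc] using this
    rw [htk, List.pairwise_append]
    refine ⟨pvPassL_sorted x pre hs, List.pairwise_singleton _ _, ?_⟩
    intro z hz b hb
    simp at hb; subst hb
    exact (pvPassL_le x pre z hz).trans (pvPassC_le c1 mid)

-- The outer fold over [s, s+m) keeps the multiset and ends fully sorted.
theorem pvOuterFold : ∀ (m s : Nat) (a : List Int), 1 ≤ s → s + m = a.length →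
    (a.take s).Pairwise (· ≤ ·) →
    (List.foldl (fun b (i : Int) =>
        (PySem.List.pyRange 0 (PySem.List.len b - 1) 1).foldl (fun b j =>
          if PySem.List.pyGetD b i 0 ≤ PySem.List.pyGetD b j 0 then
            let num := PySem.List.pyGetD b j 0
            let b' := PySem.List.pySetD b j (PySem.List.pyGetD b i 0)
            PySem.List.pySetD b' i num
          else b) b) a
        (List.map (fun k : Nat => (k : Int)) (List.range' s m))).Perm a ∧
    (List.foldl (fun b (i : Int) =>
        (PySem.List.pyRange 0 (PySem.List.len b - 1) 1).foldl (fun b j =>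
          if PySem.List.pyGetD b i 0 ≤ PySem.List.pyGetD b j 0 then
            let num := PySem.List.pyGetD b j 0
            let b' := PySem.List.pySetD b j (PySem.List.pyGetD b i 0)
            PySem.List.pySetD b' i num
          else b) b) a
        (List.map (fun k : Nat => (k : Int)) (List.range' s m))).Pairwise (· ≤ ·) := by
  intro m
  induction m with
  | zero =>
    intro s a hs hlen hsorted
    simp only [List.range', List.map_nil, List.foldl_nil]
    refine ⟨List.Perm.refl a, ?_⟩
    have : a.take s = a := List.take_of_length_le (by omega)
    rwa [this] at hsorted
  | succ n ih =>
    intro s a hs hlen hsorted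
    rw [List.range'_succ, List.map_cons, List.foldl_cons]
    have hstep := pvInnerFold_eq a s (by omega)
    rw [hstep]
    have hout := pvOuter_step a s (by omega) hsorted
    obtain ⟨hperm, hlen', hsorted'⟩ := hout
    have := ih (s + 1) (List.foldl (pvStep s) a (List.range (a.length - 1)))
      (by omega) (by omega) hsorted'
    exact ⟨this.1.trans hperm, this.2⟩

-- The whole double loop is Python's sorted().
theorem pvSortLoop_eq (arr : List Int) :
    (PySem.List.pyRange 1 (PySem.List.len arr) 1).foldl (fun a i =>
      (PySem.List.pyRange 0 (PySem.List.len a - 1) 1).foldl (fun a j =>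
        if PySem.List.pyGetD a i 0 ≤ PySem.List.pyGetD a j 0 then
          let num := PySem.List.pyGetD a j 0
          let a' := PySem.List.pySetD a j (PySem.List.pyGetD a i 0)
          PySem.List.pySetD a' i num
        else a) a) arr
      = PySem.List.sorted arr (fun x => x) false := by
  rcases arr with _ | ⟨h0, tl⟩
  · rfl
  set arr := h0 :: tl with harr
  have hlen1 : 1 ≤ arr.length := by simp [harr]
  have hcast : PySem.List.len arr = ((1 : Nat) : Int) + ((arr.length - 1 : Nat) : Int) := by
    rw [PySem.List.len_eq]; omega
  rw [hcast, show ((1 : Nat) : Int) = (1 : Int) by norm_num] at *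
  have hr : PySem.List.pyRange 1 (1 + ((arr.length - 1 : Nat) : Int)) 1
      = List.map (fun k : Nat => (k : Int)) (List.range' 1 (arr.length - 1)) := by
    have := pvPyRange_cast 1 (arr.length - 1)
    simpa using this
  rw [hr]
  have htake1 : (arr.take 1).Pairwise (fun a b => a ≤ b) := by
    simp [harr]
  have hout := pvOuterFold (arr.length - 1) 1 arr (by omega) (by omega) htake1
  set r := List.foldl _ arr (List.map (fun k : Nat => (k : Int)) (List.range' 1 (arr.length - 1)))
  refine List.Perm.eq_of_pairwise (le := (· ≤ ·)) ?_ hout.2 ?_ ?_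
  · intro a b _ _ hab hba; omega
  · have := PySem.List.sorted_pairwise arr (fun x : Int => x)
    simpa using this
  · exact hout.1.trans (PySem.List.sorted_perm arr (fun x => x) false).symm


theorem pvWriteback (S : List Int) (hS : ∀ v : Int, v ∈ S → (-5 ≤ v ∧ v ≤ 6)) :
    ∀ (rest done : List Int) (k : Nat),
    (∀ v ∈ rest, ((-5 ≤ v ∧ v ≤ 6) → v ∈ S)) →
    (List.foldl (fun (st : List Int × Int) (i : Int) =>
        if PySem.List.pyGetD st.1 i 0 ∈ S then
          (PySem.List.pySetD st.1 i (PySem.List.pyGetD S st.2 0), st.2 + 1)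
        else st) (done ++ rest, (k : Int))
        (List.map (fun k : Nat => (k : Int)) (List.range' done.length rest.length))).1
      = done ++ pvRefill rest (S.drop k) := by
  intro rest
  induction rest with
  | nil => intro done k _; simp [pvRefill]
  | cons v rest' ih =>
    intro done k hmem
    rw [List.length_cons, List.range'_succ, List.map_cons, List.foldl_cons]
    have hget : PySem.List.pyGetD (done ++ v :: rest') ((done.length : Nat) : Int) 0 = v := by
      rw [PySem.List.pyGetD_natCast]
      exact pvGetD_append_cons done rest' v 0
    by_cases hv : -5 ≤ v ∧ v ≤ 6
    · have hin : v ∈ S := hmem v (by simp) hv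
      rw [if_pos (by simpa [hget] using hin)]
      have hgS : PySem.List.pyGetD S ((k : Nat) : Int) 0 = (S.drop k).headD 0 := by
        rw [PySem.List.pyGetD_natCast, pvGetD_drop]
      have hset : PySem.List.pySetD (done ++ v :: rest') ((done.length : Nat) : Int)
          ((S.drop k).headD 0) = (done ++ [(S.drop k).headD 0]) ++ rest' := by
        rw [PySem.List.pySetD_natCast, pvSet_append_cons]
        simp
      simp only [hgS, hset]
      have hcast : ((k : Nat) : Int) + 1 = ((k + 1 : Nat) : Int) := by push_cast; ring
      rw [hcast]
      have := ih (done ++ [(S.drop k).headD 0]) (k + 1)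
        (fun w hw hwr => hmem w (by simp [hw]) hwr)
      simp only [List.length_append, List.length_cons, List.length_nil] at this ⊢
      rw [show done.length + 1 = done.length + 1 from rfl] at this
      rw [this]
      simp only [pvRefill, if_pos hv, List.tail_drop, List.append_assoc, List.cons_append,
        List.nil_append]
    · have hnin : v ∉ S := fun h => hv (hS v h)
      rw [if_neg (by simpa [hget] using hnin)]
      have := ih (done ++ [v]) k (fun w hw hwr => hmem w (by simp [hw]) hwr)
      simp only [List.length_append, List.length_cons, List.length_nil, Nat.zero_add,
        List.append_assoc, List.cons_append, List.nil_append] at this ⊢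
      rw [this]
      simp only [pvRefill, if_neg hv]


-- ===== VERDICT (by name: the statement is the Claim_ definition above) =====
theorem innterval_spec : Claim_equal_innterval := by
  intro nums _
  unfold Spec_innterval innterval innterval_alt
  dsimp only
  rw [PySem.List.foldl_append_ite_eq_filter (fun num : Int => -5 ≤ num ∧ num ≤ 6) nums []]
  rw [List.nil_append, pvSortLoop_eq]
  set S := PySem.List.sorted (nums.filter (fun v => decide (-5 ≤ v ∧ v ≤ 6))) (fun x => x) false
    with hSdef
  have hSmem : ∀ v : Int, v ∈ S ↔ (v ∈ nums ∧ (-5 ≤ v ∧ v ≤ 6)) := by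
    intro v
    rw [hSdef, (PySem.List.sorted_perm _ _ _).mem_iff, List.mem_filter]
    simp
  have hr : PySem.List.pyRange 0 (PySem.List.len nums) 1
      = List.map (fun k : Nat => (k : Int)) (List.range' 0 nums.length) := by
    have := pvPyRange_cast 0 nums.length
    simpa using this
  simp only [PySem.List.len_eq] at hr ⊢
  rw [hr]
  have := pvWriteback S (fun v hv => ((hSmem v).1 hv).2) nums []
    ((0 : Nat)) (fun v hv hvr => (hSmem v).2 ⟨hv, hvr⟩)
  simpa using this
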